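-- pv_equiv track=rewrite | github.com/Masonb3/LRLG_notebooks | LRLG_sym_wc_functions.py | exists_blocker
-- ===== SOURCE A (Python) =====
-- def exists_blocker(wc_pos, wc1, wc2, n):
--     exists = False
--
--     min_row = min(wc1[0],wc2[0])
--     min_col = min(wc1[1],wc2[1])
--     max_row = max(wc1[0],wc2[0])
--     max_col = max(wc1[1],wc2[1])
--
--     # 'rightmost such blocker'
--     wc03 = [-1,-1]
--
--     for i in range(0, n):
--         curr_row = wc_pos[i][0]
--         curr_col = wc_pos[i][1]
--
--         # we do not count the given wc1, wc2 as blockers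
--         is_wc_given = (curr_row == wc1[0] and curr_col == wc1[1]) or (curr_row == wc2[0] and curr_col == wc2[1])
--
--         if (not is_wc_given and
--            (min_row <= curr_row and curr_row <= max_row) and
--            (min_col <= curr_col and curr_col <= max_col)):
--             exists = True
--             if curr_col > wc03[1]:
--                 wc03[0] = curr_row
--                 wc03[1] = curr_col
--
--     return exists, wc03
-- ===== SOURCE B (Python) =====
-- def exists_blocker(wc_pos, wc1, wc2, n):
--     lo_r, hi_r = min(wc1[0], wc2[0]), max(wc1[0], wc2[0])
--     lo_c, hi_c = min(wc1[1], wc2[1]), max(wc1[1], wc2[1])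
--
--     def is_blocker(r, c):
--         if (r == wc1[0] and c == wc1[1]) or (r == wc2[0] and c == wc2[1]):
--             return False
--         return lo_r <= r <= hi_r and lo_c <= c <= hi_c
--
--     blockers = [(wc_pos[i][0], wc_pos[i][1]) for i in range(n)
--                 if is_blocker(wc_pos[i][0], wc_pos[i][1])]
--     if not blockers:
--         return False, [-1, -1]
--     best_col = max(c for _, c in blockers)
--     best_row = next(r for r, c in blockers if c == best_col)
--     return True, [best_row, best_col]
-- ===== Notes on version B (the rewrite author's own statement) =====
-- stated objective: alternative
-- what changed: Replaces A's single stateful loop (an exists flag and an in-place best-so-far list seeded with the sentinel [-1,-1]) by staged passes: collect the in-box blockers, test non-emptiness, compute the maximum column, then find the first blocker attaining it.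
-- intended difference: On inputs where an in-box blocker exists, every blocker's column is <= -1, and the first blocker at column -1 (if any) is not the point (-1,-1), A returns (True, [-1,-1]) because no blocker beats its sentinel seed wc03=[-1,-1], while B returns (True, [r, c]) for the actual rightmost (first max-column) blocker, which is what the 'rightmost such blocker' comment intends. — e.g. on exists_blocker([[0, -2]], [0, -3], [1, -1], 1): A returns (true, [-1, -1]), B returns (true, [0, -2])
import Mathlib
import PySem

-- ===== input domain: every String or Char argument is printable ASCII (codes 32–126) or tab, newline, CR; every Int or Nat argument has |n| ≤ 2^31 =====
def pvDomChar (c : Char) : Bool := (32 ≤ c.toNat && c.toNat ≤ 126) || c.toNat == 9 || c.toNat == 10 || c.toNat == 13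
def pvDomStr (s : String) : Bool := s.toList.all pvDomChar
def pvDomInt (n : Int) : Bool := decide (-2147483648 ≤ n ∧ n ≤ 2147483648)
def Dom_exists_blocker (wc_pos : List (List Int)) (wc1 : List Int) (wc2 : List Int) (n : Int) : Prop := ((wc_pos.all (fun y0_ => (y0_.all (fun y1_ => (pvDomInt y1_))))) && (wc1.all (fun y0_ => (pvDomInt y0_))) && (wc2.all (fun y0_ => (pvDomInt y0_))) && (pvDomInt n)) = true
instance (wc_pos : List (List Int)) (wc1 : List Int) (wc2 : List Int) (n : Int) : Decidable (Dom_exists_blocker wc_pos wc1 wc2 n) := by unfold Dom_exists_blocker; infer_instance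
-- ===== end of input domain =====

-- B replaces A's single stateful loop with staged passes (collect blockers, non-emptiness,
-- maximum column, first blocker attaining it); same cost, and B returns the actual rightmost
-- blocker where A's sentinel seed loses it (the D_ region below). Return values only; A mutates
-- only its own local list.

-- ===== PORT A =====
def exists_blocker (wc_pos : List (List Int)) (wc1 : List Int) (wc2 : List Int) (n : Int) : Bool × List Int :=
  let w10 := (PySem.List.pyGet? wc1 0).getD 0
  let w11 := (PySem.List.pyGet? wc1 1).getD 0
  let w20 := (PySem.List.pyGet? wc2 0).getD 0
  let w21 := (PySem.List.pyGet? wc2 1).getD 0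
  let min_row := min w10 w20
  let min_col := min w11 w21
  let max_row := max w10 w20
  let max_col := max w11 w21
  (PySem.List.pyRange 0 n 1).foldl (fun (s : Bool × List Int) i =>
    let curr_row := (PySem.List.pyGet? ((PySem.List.pyGet? wc_pos i).getD []) 0).getD 0
    let curr_col := (PySem.List.pyGet? ((PySem.List.pyGet? wc_pos i).getD []) 1).getD 0
    if !((curr_row == w10 && curr_col == w11) || (curr_row == w20 && curr_col == w21)) &&
         (min_row ≤ curr_row && curr_row ≤ max_row) && (min_col ≤ curr_col && curr_col ≤ max_col) then
      (true, if curr_col > (PySem.List.pyGet? s.2 1).getD 0 then [curr_row, curr_col] else s.2)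
    else s) (false, [-1, -1])

-- ===== PORT B =====
def exists_blocker_alt (wc_pos : List (List Int)) (wc1 : List Int) (wc2 : List Int) (n : Int) : Bool × List Int :=
  let w10 := (PySem.List.pyGet? wc1 0).getD 0
  let w11 := (PySem.List.pyGet? wc1 1).getD 0
  let w20 := (PySem.List.pyGet? wc2 0).getD 0
  let w21 := (PySem.List.pyGet? wc2 1).getD 0
  let lo_r := min w10 w20
  let hi_r := max w10 w20
  let lo_c := min w11 w21
  let hi_c := max w11 w21
  let is_blocker := fun (r c : Int) =>
    if (r == w10 && c == w11) || (r == w20 && c == w21) then false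
    else (lo_r ≤ r && r ≤ hi_r) && (lo_c ≤ c && c ≤ hi_c)
  let blockers := (PySem.List.pyRange 0 n 1).filterMap (fun i =>
    let r := (PySem.List.pyGet? ((PySem.List.pyGet? wc_pos i).getD []) 0).getD 0
    let c := (PySem.List.pyGet? ((PySem.List.pyGet? wc_pos i).getD []) 1).getD 0
    if is_blocker r c then some (r, c) else none)
  match blockers with
  | [] => (false, [-1, -1])
  | b :: bs =>
      let best_col := (PySem.List.max? ((b :: bs).map (fun p => p.2)) (fun y => y)).getD 0
      let best_row := (((b :: bs).find? (fun p => p.2 == best_col)).getD b).1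
      (true, [best_row, best_col])

-- ===== PRECONDITION & SPEC =====
-- Pre_ excludes exactly the inputs where Python A raises IndexError: n beyond len(wc_pos),
-- wc1/wc2 shorter than 2, or a visited row shorter than 2 (negative n is fine: empty loop).
def Pre_exists_blocker (wc_pos : List (List Int)) (wc1 : List Int) (wc2 : List Int) (n : Int) : Prop :=
  n ≤ (wc_pos.length : Int) ∧ 2 ≤ wc1.length ∧ 2 ≤ wc2.length ∧
  ∀ row ∈ wc_pos.take n.toNat, 2 ≤ row.length
instance (wc_pos : List (List Int)) (wc1 : List Int) (wc2 : List Int) (n : Int) : Decidable (Pre_exists_blocker wc_pos wc1 wc2 n) := by unfold Pre_exists_blocker; infer_instance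
def pvWitness_exists_blocker : List (List Int) × List Int × List Int × Int := ([[0, 2], [5, 5]], [0, 0], [1, 3], 2)

-- (row, column) of a point, and the blocker test, read directly off the input (used only by D_).
def pvPt (p : List Int) : Int × Int := (p.getD 0 0, p.getD 1 0)
def pvIsBlocker (a b q : Int × Int) : Bool :=
  decide (q ∉ [a, b] ∧ |2*q.1 - a.1 - b.1| ≤ |a.1 - b.1| ∧ |2*q.2 - a.2 - b.2| ≤ |a.2 - b.2|)

def pvBlkPts (wc_pos : List (List Int)) (wc1 wc2 : List Int) (n : Int) : List (Int × Int) :=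
  ((wc_pos.take n.toNat).map pvPt).filter (pvIsBlocker (pvPt wc1) (pvPt wc2))

-- On inputs where an in-box blocker exists, every blocker's column is ≤ -1, and the first
-- blocker at column -1 (if any) is not the point (-1, -1), A returns (true, [-1, -1]) because
-- no blocker beats its sentinel seed wc03 = [-1, -1], while B returns the actual rightmost
-- (first maximum-column) blocker, which is what the 'rightmost such blocker' comment intends.
def pvSentinelRegion (pts : List (Int × Int)) : Prop :=
  pts ≠ [] ∧ (∀ q ∈ pts, q.2 ≤ -1) ∧
  ((pts.find? (·.2 == -1)).all (· != (-1, -1))) = true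

def D_exists_blocker (wc_pos : List (List Int)) (wc1 : List Int) (wc2 : List Int) (n : Int) : Prop :=
  pvSentinelRegion (pvBlkPts wc_pos wc1 wc2 n)
instance (wc_pos : List (List Int)) (wc1 : List Int) (wc2 : List Int) (n : Int) : Decidable (D_exists_blocker wc_pos wc1 wc2 n) := by unfold D_exists_blocker pvSentinelRegion; infer_instance

def Spec_exists_blocker (wc_pos : List (List Int)) (wc1 : List Int) (wc2 : List Int) (n : Int) (out : Bool × List Int) : Prop := ¬ D_exists_blocker wc_pos wc1 wc2 n → out = exists_blocker_alt wc_pos wc1 wc2 n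
instance (wc_pos : List (List Int)) (wc1 : List Int) (wc2 : List Int) (n : Int) (out : Bool × List Int) : Decidable (Spec_exists_blocker wc_pos wc1 wc2 n out) := by unfold Spec_exists_blocker; infer_instance

def pvDiffWitness_exists_blocker : List (List Int) × List Int × List Int × Int := ([[0, -2]], [0, -3], [1, -1], 1)
def pvDiffWitnessOut_exists_blocker : (Bool × List Int) × (Bool × List Int) := ((true, [-1, -1]), (true, [0, -2]))

-- ===== CLAIM (what is proved, stated in full; the proofs are below) =====
def Claim_unchanged_exists_blocker : Prop := ∀ (wc_pos : List (List Int)) (wc1 : List Int) (wc2 : List Int) (n : Int), Dom_exists_blocker wc_pos wc1 wc2 n → Pre_exists_blocker wc_pos wc1 wc2 n → Spec_exists_blocker wc_pos wc1 wc2 n (exists_blocker wc_pos wc1 wc2 n)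
def Claim_changed_exists_blocker : Prop := Dom_exists_blocker (pvDiffWitness_exists_blocker.1) (pvDiffWitness_exists_blocker.2.1) (pvDiffWitness_exists_blocker.2.2.1) (pvDiffWitness_exists_blocker.2.2.2) ∧ Pre_exists_blocker (pvDiffWitness_exists_blocker.1) (pvDiffWitness_exists_blocker.2.1) (pvDiffWitness_exists_blocker.2.2.1) (pvDiffWitness_exists_blocker.2.2.2) ∧ D_exists_blocker (pvDiffWitness_exists_blocker.1) (pvDiffWitness_exists_blocker.2.1) (pvDiffWitness_exists_blocker.2.2.1) (pvDiffWitness_exists_blocker.2.2.2) ∧ exists_blocker (pvDiffWitness_exists_blocker.1) (pvDiffWitness_exists_blocker.2.1) (pvDiffWitness_exists_blocker.2.2.1) (pvDiffWitness_exists_blocker.2.2.2) = pvDiffWitnessOut_exists_blocker.1 ∧ exists_blocker_alt (pvDiffWitness_exists_blocker.1) (pvDiffWitness_exists_blocker.2.1) (pvDiffWitness_exists_blocker.2.2.1) (pvDiffWitness_exists_blocker.2.2.2) = pvDiffWitnessOut_exists_blocker.2 ∧ pvDiffWitnessOut_exists_blocker.1 ≠ pvDiffWitnessOut_exists_bloc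ker.2

def Claim_exact_exists_blocker : Prop := ∀ (wc_pos : List (List Int)) (wc1 : List Int) (wc2 : List Int) (n : Int), Dom_exists_blocker wc_pos wc1 wc2 n → Pre_exists_blocker wc_pos wc1 wc2 n → D_exists_blocker wc_pos wc1 wc2 n → exists_blocker wc_pos wc1 wc2 n ≠ exists_blocker_alt wc_pos wc1 wc2 n

-- ===== LEMMAS AND PROOFS =====

/-- The pair list a per-element filter produces, abstracted over the per-element data. -/
def pvBlk {α : Type} (f : α → Bool) (cr cc : α → Int) (l : List α) : List (Int × Int) :=
  l.filterMap (fun x => if f x then some (cr x, cc x) else none)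

/-- A's inner update: keep the first element whose column strictly exceeds the current best. -/
def pvUpd (p : Int × Int) (bs : List (Int × Int)) : Int × Int :=
  bs.foldl (fun b q => if q.2 > b.2 then q else b) p

/-- Running maximum of the columns, seeded. -/
def pvMax (s : Int) (bs : List (Int × Int)) : Int :=
  bs.foldl (fun m p => max m p.2) s

lemma pvUpd_cons (p q : Int × Int) (bs : List (Int × Int)) :
    pvUpd p (q :: bs) = pvUpd (if q.2 > p.2 then q else p) bs := by
  simp [pvUpd, List.foldl]

/-- A's loop, with the per-element data abstracted, computes non-emptiness of the blocker list
    and the strict-max fold over it. -/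
lemma pvKey {α : Type} (f : α → Bool) (cr cc : α → Int) :
    ∀ (l : List α) (e : Bool) (r c : Int),
    l.foldl (fun (s : Bool × List Int) x =>
        if f x then
          (true, if cc x > (PySem.List.pyGet? s.2 1).getD 0 then [cr x, cc x] else s.2)
        else s) (e, [r, c])
    = (e || decide (0 < (pvBlk f cr cc l).length),
       [(pvUpd (r, c) (pvBlk f cr cc l)).1, (pvUpd (r, c) (pvBlk f cr cc l)).2]) := by
  intro l
  induction l with
  | nil => intro e r c; simp [pvBlk, pvUpd]
  | cons x l ih =>
      intro e r c
      have hget : (PySem.List.pyGet? [r, c] 1).getD 0 = c := by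
        simp [PySem.List.pyGet?, PySem.List.pyIdx?]
      have hblk : pvBlk f cr cc (x :: l)
          = if f x then (cr x, cc x) :: pvBlk f cr cc l else pvBlk f cr cc l := by
        by_cases h : f x <;> simp [pvBlk, h]
      rw [List.foldl_cons]
      by_cases h : f x
      · rw [if_pos h, hget, hblk, if_pos h]
        by_cases hc : cc x > c
        · rw [if_pos hc, ih true (cr x) (cc x), pvUpd_cons]
          simp [hc]
        · rw [if_neg hc, ih true r c, pvUpd_cons]
          simp [hc]
      · rw [if_neg h, hblk, if_neg h, ih e r c]

lemma pvMax_seed (bs : List (Int × Int)) : ∀ a b : Int, pvMax (max a b) bs = max a (pvMax b bs) := by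
  induction bs with
  | nil => intro a b; rfl
  | cons q bs ih =>
      intro a b
      show pvMax (max (max a b) q.2) bs = max a (pvMax (max b q.2) bs)
      rw [max_assoc, ih]

lemma pvMax_attained (bs : List (Int × Int)) : ∀ s : Int, pvMax s bs = s ∨ ∃ q ∈ bs, q.2 = pvMax s bs := by
  induction bs with
  | nil => intro s; exact Or.inl rfl
  | cons q bs ih =>
      intro s
      have hdef : pvMax s (q :: bs) = pvMax (max s q.2) bs := rfl
      rcases ih (max s q.2) with h | ⟨p, hp, hpe⟩
      · by_cases hc : q.2 ≤ s
        · left; rw [hdef, h]; omega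
        · right; exact ⟨q, List.mem_cons_self, by rw [hdef, h]; omega⟩
      · right; exact ⟨p, List.mem_cons_of_mem _ hp, by rw [hdef]; exact hpe⟩

lemma pvUpd_all_le (bs : List (Int × Int)) : ∀ s : Int × Int, (∀ q ∈ bs, q.2 ≤ s.2) → pvUpd s bs = s := by
  induction bs with
  | nil => intro s _; rfl
  | cons q bs ih =>
      intro s h
      rw [pvUpd_cons, if_neg (by have := h q List.mem_cons_self; omega)]
      exact ih s (fun p hp => h p (List.mem_cons_of_mem _ hp))

/-- Where some element beats the seed, A's strict-max fold lands on exactly the first element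
    attaining the running maximum of the columns — the element B's find? picks. -/
lemma pvUpd_find (bs : List (Int × Int)) : ∀ s : Int × Int, (∃ q ∈ bs, s.2 < q.2) →
    ∃ p0, bs.find? (fun p => p.2 == pvMax s.2 bs) = some p0 ∧ pvUpd s bs = p0 := by
  induction bs with
  | nil => rintro s ⟨q, hq, -⟩; cases hq
  | cons q bs ih =>
      intro s hex
      have hMge : ∀ p ∈ q :: bs, p.2 ≤ pvMax s.2 (q :: bs) := by
        intro p hp
        have h2 := (PySem.List.le_foldl_max_int (q :: bs) (fun p => p.2) s.2).2
        exact h2 p hp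
      have hMgt : s.2 < pvMax s.2 (q :: bs) := by
        rcases hex with ⟨q', hq', hlt⟩
        exact lt_of_lt_of_le hlt (hMge q' hq')
      have hstep : pvMax s.2 (q :: bs) = pvMax (max s.2 q.2) bs := rfl
      by_cases hq : q.2 = pvMax s.2 (q :: bs)
      · refine ⟨q, ?_, ?_⟩
        · exact List.find?_cons_of_pos (h := by simp [hq])
        · have hqs : s.2 < q.2 := by omega
          rw [pvUpd_cons, if_pos (by omega)]
          exact pvUpd_all_le bs q (fun p hp => by
            have := hMge p (List.mem_cons_of_mem _ hp); omega)
      · have hfind : (q :: bs).find? (fun p => p.2 == pvMax s.2 (q :: bs))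
            = bs.find? (fun p => p.2 == pvMax s.2 (q :: bs)) :=
          List.find?_cons_of_neg (h := by simp [hq])
        set s' : Int × Int := if q.2 > s.2 then q else s with hs'
        have hs'2 : s'.2 = max s.2 q.2 := by
          rw [hs']; split_ifs with h <;> omega
        have hM' : pvMax s.2 (q :: bs) = pvMax s'.2 bs := by rw [hstep, hs'2]
        have hex' : ∃ p ∈ bs, s'.2 < p.2 := by
          have : s'.2 < pvMax s'.2 bs := by
            rcases pvMax_attained bs s'.2 with h | ⟨p, hp, hpe⟩
            · exfalso
              rw [hM', h] at hMgt hq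
              have := hMge q List.mem_cons_self
              rw [hM', h] at this
              omega
            · rw [← hM'] at hpe ⊢
              have hq2 : q.2 < pvMax s.2 (q :: bs) := by
                have := hMge q List.mem_cons_self; omega
              rw [hs'2]; omega
          rcases pvMax_attained bs s'.2 with h | ⟨p, hp, hpe⟩
          · omega
          · exact ⟨p, hp, by omega⟩
        rcases ih s' hex' with ⟨p0, hf, hu⟩
        refine ⟨p0, ?_, ?_⟩
        · rw [hfind, hM']; exact hf
        · rw [pvUpd_cons, ← hs']; exact hu

/-- Reading the first n elements through pyRange/pyGet? is List.take. -/
lemma pvTakeRange {α : Type} (d : α) : ∀ (m : Nat) (l : List α), m ≤ l.length →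
    (List.range m).map (fun (k : Nat) => (PySem.List.pyGet? l ((k : Nat) : Int)).getD d) = l.take m := by
  intro m
  induction m with
  | zero => intro l _; simp
  | succ m ih =>
      intro l hm
      rw [List.range_succ, List.map_append, ih l (by omega)]
      have hm' : m < l.length := by omega
      rw [List.map_singleton, PySem.List.pyGet?_natCast, List.getElem?_eq_getElem hm',
        Option.getD_some, List.take_add_one, List.getElem?_eq_getElem hm']
      rfl

/-- Reading the first n elements through pyRange/pyGet? is List.take. -/
lemma pvMapRange {α : Type} (l : List α) (d : α) (n : Int) (hn : n ≤ (l.length : Int)) :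
    (PySem.List.pyRange 0 n 1).map (fun i => (PySem.List.pyGet? l i).getD d) = l.take n.toNat := by
  rw [PySem.List.pyRange_one]
  simp only [Int.sub_zero, List.map_map, Function.comp_def, zero_add]
  exact pvTakeRange d n.toNat l (by omega)

-- Proof-side abbreviations for the per-row reads and the two blocker conditions.
def pvCR (p : List Int) : Int := (PySem.List.pyGet? p 0).getD 0
def pvCC (p : List Int) : Int := (PySem.List.pyGet? p 1).getD 0
def pvFA (wc1 wc2 p : List Int) : Bool :=
  !((pvCR p == pvCR wc1 && pvCC p == pvCC wc1) || (pvCR p == pvCR wc2 && pvCC p == pvCC wc2)) &&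
  (min (pvCR wc1) (pvCR wc2) ≤ pvCR p && pvCR p ≤ max (pvCR wc1) (pvCR wc2)) &&
  (min (pvCC wc1) (pvCC wc2) ≤ pvCC p && pvCC p ≤ max (pvCC wc1) (pvCC wc2))
def pvFB (wc1 wc2 p : List Int) : Bool :=
  if (pvCR p == pvCR wc1 && pvCC p == pvCC wc1) || (pvCR p == pvCR wc2 && pvCC p == pvCC wc2) then false
  else (min (pvCR wc1) (pvCR wc2) ≤ pvCR p && pvCR p ≤ max (pvCR wc1) (pvCR wc2)) &&
       (min (pvCC wc1) (pvCC wc2) ≤ pvCC p && pvCC p ≤ max (pvCC wc1) (pvCC wc2))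

lemma pvFA_eq_pvFB (wc1 wc2 p : List Int) : pvFA wc1 wc2 p = pvFB wc1 wc2 p := by
  unfold pvFA pvFB
  by_cases h : ((pvCR p == pvCR wc1 && pvCC p == pvCC wc1) || (pvCR p == pvCR wc2 && pvCC p == pvCC wc2)) = true
  · simp [h]
  · simp [h, Bool.and_assoc]

lemma pvBlk_congr {α : Type} {f g : α → Bool} (cr cc : α → Int) {l : List α}
    (h : ∀ x ∈ l, f x = g x) : pvBlk f cr cc l = pvBlk g cr cc l :=
  List.filterMap_congr (fun x hx => by rw [h x hx])

lemma pvRead0 (p : List Int) (h : 2 ≤ p.length) : pvCR p = (pvPt p).1 := by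
  match p with
  | [] => simp at h
  | [a] => simp at h
  | a :: b :: t => simp [pvCR, pvPt, PySem.List.pyGet?_zero_cons]

lemma pvRead1 (p : List Int) (h : 2 ≤ p.length) : pvCC p = (pvPt p).2 := by
  match p with
  | [] => simp at h
  | [a] => simp at h
  | a :: b :: t => simp [pvCC, pvPt, PySem.List.pyGet?, PySem.List.pyIdx?]

lemma pvBetween (a b x : Int) : (|2*x - a - b| ≤ |a - b|) ↔ (min a b ≤ x ∧ x ≤ max a b) := by
  rcases abs_cases (2*x - a - b) with ⟨h1, _⟩ | ⟨h1, _⟩ <;>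
    rcases abs_cases (a - b) with ⟨h3, _⟩ | ⟨h3, _⟩ <;> rw [h1, h3] <;> omega

lemma pvBoolEq (r c r1 c1 r2 c2 : Int) :
    (!((r == r1 && c == c1) || (r == r2 && c == c2)) &&
     (decide (min r1 r2 ≤ r) && decide (r ≤ max r1 r2)) &&
     (decide (min c1 c2 ≤ c) && decide (c ≤ max c1 c2)))
    = pvIsBlocker (r1, c1) (r2, c2) (r, c) := by
  unfold pvIsBlocker
  by_cases h1 : r = r1 <;> by_cases h2 : c = c1 <;> by_cases h3 : r = r2 <;> by_cases h4 : c = c2 <;>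
    simp [h1, h2, h3, h4, Prod.ext_iff, List.mem_cons, pvBetween, Bool.decide_and,
      Bool.beq_eq_decide_eq, Bool.and_assoc]

/-- Under the length facts of Pre_, the port-side blocker test is D_'s input-level one. -/
lemma pvFB_eq_isBlocker (wc1 wc2 p : List Int) (h1 : 2 ≤ wc1.length) (h2 : 2 ≤ wc2.length)
    (hp : 2 ≤ p.length) : pvFB wc1 wc2 p = pvIsBlocker (pvPt wc1) (pvPt wc2) (pvPt p) := by
  rw [← pvFA_eq_pvFB]
  unfold pvFA
  rw [pvRead0 p hp, pvRead1 p hp, pvRead0 wc1 h1, pvRead1 wc1 h1, pvRead0 wc2 h2, pvRead1 wc2 h2]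
  exact pvBoolEq (pvPt p).1 (pvPt p).2 (pvPt wc1).1 (pvPt wc1).2 (pvPt wc2).1 (pvPt wc2).2

/-- B's tail computation (non-emptiness, max column, first blocker attaining it),
    as a function of the blocker list. -/
def pvTail (bl : List (Int × Int)) : Bool × List Int :=
  match bl with
  | [] => (false, [-1, -1])
  | b :: bs =>
      (true, [(((b :: bs).find? (fun p =>
                  p.2 == (PySem.List.max? ((b :: bs).map (fun p => p.2)) (fun y => y)).getD 0)).getD b).1,
              (PySem.List.max? ((b :: bs).map (fun p => p.2)) (fun y => y)).getD 0])

/-- A's fold outcome equals B's staged computation, on any blocker list that is empty or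
    contains an element beating A's sentinel column -1. -/
lemma pvMain (bl : List (Int × Int)) (hex : bl = [] ∨ ∃ q ∈ bl, (-1 : Int) < q.2) :
    (false || decide (0 < bl.length),
     [(pvUpd (-1, -1) bl).1, (pvUpd (-1, -1) bl).2]) = pvTail bl := by
  cases bl with
  | nil => rfl
  | cons b bs =>
      rcases hex with h | ⟨q, hq, hlt⟩
      · cases h
      have hM : (PySem.List.max? ((b :: bs).map (fun p => p.2)) (fun y => y)).getD 0
          = pvMax (-1) (b :: bs) := by
        rw [List.map_cons, PySem.List.max?_id_cons, Option.getD_some, List.foldl_map]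
        have h0 : bs.foldl (fun x y => max x y.2) b.2 = pvMax b.2 bs := rfl
        have h1 : pvMax (-1) (b :: bs) = max (-1) (pvMax b.2 bs) := pvMax_seed bs (-1) b.2
        have hq2 : q.2 ≤ pvMax (-1) (b :: bs) :=
          (PySem.List.le_foldl_max_int (b :: bs) (fun p => p.2) (-1)).2 q hq
        have hX : max (-1) (pvMax b.2 bs) = pvMax b.2 bs := by
          rcases le_or_gt (-1) (pvMax b.2 bs) with h | h
          · exact max_eq_right h
          · exfalso
            rw [h1, max_eq_left (le_of_lt h)] at hq2
            omega
        rw [h0, h1, hX]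
      obtain ⟨p0, hf, hu⟩ := pvUpd_find (b :: bs) (-1, -1) ⟨q, hq, hlt⟩
      have hf' : (b :: bs).find? (fun p => p.2 == pvMax (-1) (b :: bs)) = some p0 := hf
      have hp02 : p0.2 = pvMax (-1) (b :: bs) := by
        have := List.find?_some hf'
        simpa using this
      show (false || decide (0 < (b :: bs).length), [(pvUpd (-1, -1) (b :: bs)).1, (pvUpd (-1, -1) (b :: bs)).2])
          = (true, [(((b :: bs).find? (fun p =>
                p.2 == (PySem.List.max? ((b :: bs).map (fun p => p.2)) (fun y => y)).getD 0)).getD b).1,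
              (PySem.List.max? ((b :: bs).map (fun p => p.2)) (fun y => y)).getD 0])
      rw [hM, hf', Option.getD_some, hu, ← hp02]
      simp

-- helper lemmas shared by the verdict proofs

lemma pvFilterMapEq {α β : Type} (g : α → Bool) (f : α → β) (l : List α) :
    l.filterMap (fun x => if g x then some (f x) else none) = (l.filter g).map f := by
  induction l with
  | nil => rfl
  | cons a l ih => cases h : g a <;> simp [h, ih]

/-- Both ports, canonicalised to functions of the blocker point list. -/
lemma pvPorts (wc_pos : List (List Int)) (wc1 wc2 : List Int) (n : Int)
    (hn : n ≤ (wc_pos.length : Int)) (hw1 : 2 ≤ wc1.length) (hw2 : 2 ≤ wc2.length)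
    (hrows : ∀ row ∈ wc_pos.take n.toNat, 2 ≤ row.length) :
    exists_blocker wc_pos wc1 wc2 n
      = (false || decide (0 < (pvBlkPts wc_pos wc1 wc2 n).length),
         [(pvUpd (-1, -1) (pvBlkPts wc_pos wc1 wc2 n)).1,
          (pvUpd (-1, -1) (pvBlkPts wc_pos wc1 wc2 n)).2])
    ∧ exists_blocker_alt wc_pos wc1 wc2 n = pvTail (pvBlkPts wc_pos wc1 wc2 n) := by
  have hA : exists_blocker wc_pos wc1 wc2 n
      = (false || decide (0 < (pvBlk (pvFA wc1 wc2) pvCR pvCC (wc_pos.take n.toNat)).length),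
         [(pvUpd (-1, -1) (pvBlk (pvFA wc1 wc2) pvCR pvCC (wc_pos.take n.toNat))).1,
          (pvUpd (-1, -1) (pvBlk (pvFA wc1 wc2) pvCR pvCC (wc_pos.take n.toNat))).2]) := by
    have h1 : exists_blocker wc_pos wc1 wc2 n
        = (wc_pos.take n.toNat).foldl (fun (s : Bool × List Int) x =>
            if pvFA wc1 wc2 x then
              (true, if pvCC x > (PySem.List.pyGet? s.2 1).getD 0 then [pvCR x, pvCC x] else s.2)
            else s) (false, [-1, -1]) := by
      rw [← pvMapRange wc_pos [] n hn]
      exact (List.foldl_map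
        (f := fun i => (PySem.List.pyGet? wc_pos i).getD [])
        (g := fun (s : Bool × List Int) x =>
          if pvFA wc1 wc2 x then
            (true, if pvCC x > (PySem.List.pyGet? s.2 1).getD 0 then [pvCR x, pvCC x] else s.2)
          else s)).symm
    rw [h1, pvKey]
  have hblockers : ((PySem.List.pyRange 0 n 1).filterMap (fun i =>
      let r := (PySem.List.pyGet? ((PySem.List.pyGet? wc_pos i).getD []) 0).getD 0
      let c := (PySem.List.pyGet? ((PySem.List.pyGet? wc_pos i).getD []) 1).getD 0
      if (if (r == pvCR wc1 && c == pvCC wc1) || (r == pvCR wc2 && c == pvCC wc2) then false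
          else (min (pvCR wc1) (pvCR wc2) ≤ r && r ≤ max (pvCR wc1) (pvCR wc2)) &&
               (min (pvCC wc1) (pvCC wc2) ≤ c && c ≤ max (pvCC wc1) (pvCC wc2)))
      then some (r, c) else none))
      = pvBlk (pvFB wc1 wc2) pvCR pvCC (wc_pos.take n.toNat) := by
    rw [← pvMapRange wc_pos [] n hn]
    exact (List.filterMap_map
        (f := fun i => (PySem.List.pyGet? wc_pos i).getD [])
        (g := fun p => if pvFB wc1 wc2 p then some (pvCR p, pvCC p) else none)).symm
  have hAB : pvBlk (pvFA wc1 wc2) pvCR pvCC (wc_pos.take n.toNat)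
      = pvBlk (pvFB wc1 wc2) pvCR pvCC (wc_pos.take n.toNat) :=
    pvBlk_congr pvCR pvCC (fun x _ => pvFA_eq_pvFB wc1 wc2 x)
  have hBD : pvBlk (pvFB wc1 wc2) pvCR pvCC (wc_pos.take n.toNat)
      = pvBlkPts wc_pos wc1 wc2 n := by
    unfold pvBlk pvBlkPts
    rw [List.filter_map,
      ← pvFilterMapEq (pvIsBlocker (pvPt wc1) (pvPt wc2) ∘ pvPt) pvPt (wc_pos.take n.toNat)]
    exact List.filterMap_congr (fun p hp => by
      rw [pvFB_eq_isBlocker wc1 wc2 p hw1 hw2 (hrows p hp), pvRead0 p (hrows p hp),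
        pvRead1 p (hrows p hp)]
      rfl)
  constructor
  · rw [hA, hAB, hBD]
  · rw [show exists_blocker_alt wc_pos wc1 wc2 n
        = pvTail (pvBlk (pvFB wc1 wc2) pvCR pvCC (wc_pos.take n.toNat)) from by
      rw [← hblockers]; rfl, hBD]

/-- B's tail on a nonempty list: the first element attaining the maximum column. -/
lemma pvTail_cons (b : Int × Int) (bs : List (Int × Int)) :
    ∃ p1, (b :: bs).find? (fun p => p.2 == pvMax b.2 bs) = some p1 ∧ p1 ∈ b :: bs ∧
      p1.2 = pvMax b.2 bs ∧ pvTail (b :: bs) = (true, [p1.1, pvMax b.2 bs]) := by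
  have hM : (PySem.List.max? ((b :: bs).map (fun p => p.2)) (fun y => y)).getD 0
      = pvMax b.2 bs := by
    rw [List.map_cons, PySem.List.max?_id_cons, Option.getD_some, List.foldl_map]; rfl
  have hatt : ∃ x ∈ b :: bs, x.2 = pvMax b.2 bs := by
    rcases pvMax_attained bs b.2 with h | ⟨q, hq, hqe⟩
    · exact ⟨b, List.mem_cons_self, h.symm⟩
    · exact ⟨q, List.mem_cons_of_mem _ hq, hqe⟩
  have hsome : ((b :: bs).find? (fun p => p.2 == pvMax b.2 bs)).isSome := by
    rw [List.find?_isSome]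
    obtain ⟨x, hx, hxe⟩ := hatt
    exact ⟨x, hx, by simp [hxe]⟩
  obtain ⟨p1, hp1⟩ := Option.isSome_iff_exists.mp hsome
  refine ⟨p1, hp1, List.mem_of_find?_eq_some hp1, by simpa using List.find?_some hp1, ?_⟩
  show (true, [(((b :: bs).find? (fun p =>
      p.2 == (PySem.List.max? ((b :: bs).map (fun p => p.2)) (fun y => y)).getD 0)).getD b).1,
      (PySem.List.max? ((b :: bs).map (fun p => p.2)) (fun y => y)).getD 0])
    = (true, [p1.1, pvMax b.2 bs])
  rw [hM, hp1, Option.getD_some]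

/-- In the all-columns-≤ -1 region: A's side is the sentinel, B's side is the first
    maximum-column blocker, which is also what find? at column -1 locates when the
    maximum is -1, and find? finds nothing when the maximum is below -1. -/
lemma pvCore (b : Int × Int) (bs : List (Int × Int)) (hle : ∀ x ∈ b :: bs, x.2 ≤ -1) :
    ∃ p1 : Int × Int,
      (false || decide (0 < (b :: bs).length),
        [(pvUpd (-1, -1) (b :: bs)).1, (pvUpd (-1, -1) (b :: bs)).2]) = (true, [-1, -1]) ∧
      pvTail (b :: bs) = (true, [p1.1, p1.2]) ∧ p1.2 ≤ -1 ∧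
      (p1.2 = -1 → (b :: bs).find? (fun q => q.2 == -1) = some p1) ∧
      (p1.2 < -1 → (b :: bs).find? (fun q => q.2 == -1) = none) := by
  obtain ⟨p1, hfind, hmem, hp12, htail⟩ := pvTail_cons b bs
  have hbound := PySem.List.le_foldl_max_int bs (fun p => p.2) b.2
  refine ⟨p1, ?_, by rw [htail, hp12], hp12 ▸ hle p1 hmem, ?_, ?_⟩
  · rw [pvUpd_all_le (b :: bs) (-1, -1) hle]
    simp
  · intro h1
    rw [← show pvMax b.2 bs = -1 from hp12 ▸ h1]
    exact hfind
  · intro h1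
    rw [List.find?_eq_none]
    intro q hq
    have hqM : q.2 ≤ pvMax b.2 bs := by
      rcases List.mem_cons.mp hq with h | h
      · rw [h]; exact hbound.1
      · exact hbound.2 q h
    simp only [beq_iff_eq]
    omega

-- ===== VERDICT (by name: the statement is the Claim_ definition above) =====
theorem exists_blocker_spec : Claim_unchanged_exists_blocker := by
  intro wc_pos wc1 wc2 n _ hpre hnD
  obtain ⟨hn, hw1, hw2, hrows⟩ := hpre
  obtain ⟨hA, hB⟩ := pvPorts wc_pos wc1 wc2 n hn hw1 hw2 hrows
  rw [hA, hB]
  unfold D_exists_blocker pvSentinelRegion at hnD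
  by_cases h1 : pvBlkPts wc_pos wc1 wc2 n = []
  · rw [h1]
    exact pvMain [] (Or.inl rfl)
  · by_cases h2 : ∀ q ∈ pvBlkPts wc_pos wc1 wc2 n, q.2 ≤ -1
    · -- sentinel region, but the first column -1 blocker is (-1, -1): both return it
      have h3 : ¬ ((pvBlkPts wc_pos wc1 wc2 n).find? (fun q => q.2 == -1)).all
          (fun q => q != (-1, -1)) = true := fun h3 => hnD ⟨h1, h2, h3⟩
      obtain ⟨b, bs, hc⟩ := List.exists_cons_of_ne_nil h1
      rw [hc] at h2 h3 ⊢
      obtain ⟨p1, hAv, hBv, hple, hfeq, hfnone⟩ := pvCore b bs h2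
      cases hfo : (b :: bs).find? (fun q => q.2 == -1) with
      | none => exact absurd (by simp [hfo]) h3
      | some q1 =>
          have hq1 : q1 = (-1, -1) := by
            by_contra hne
            exact h3 (by simp [hfo, hne])
          have hp1v : p1 = (-1, -1) := by
            rcases lt_or_eq_of_le hple with h | h
            · rw [hfnone h] at hfo; cases hfo
            · rw [hfeq h] at hfo
              rw [← hq1, Option.some.inj hfo]
          rw [hAv, hBv, hp1v]
    · push Not at h2
      obtain ⟨q, hq, hgt⟩ := h2
      exact pvMain _ (Or.inr ⟨q, hq, by omega⟩)

theorem exists_blocker_changed : Claim_changed_exists_blocker := by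
  unfold Claim_changed_exists_blocker; decide

theorem exists_blocker_tight : Claim_exact_exists_blocker := by
  intro wc_pos wc1 wc2 n _ hpre hD
  obtain ⟨hn, hw1, hw2, hrows⟩ := hpre
  unfold D_exists_blocker pvSentinelRegion at hD
  obtain ⟨h1, h2, h3⟩ := hD
  obtain ⟨hA, hB⟩ := pvPorts wc_pos wc1 wc2 n hn hw1 hw2 hrows
  rw [hA, hB]
  obtain ⟨b, bs, hc⟩ := List.exists_cons_of_ne_nil h1
  rw [hc] at h2 h3 ⊢
  obtain ⟨p1, hAv, hBv, hple, hfeq, hfnone⟩ := pvCore b bs h2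
  rw [hAv, hBv]
  intro hcontra
  have hp : p1.1 = -1 ∧ p1.2 = -1 := by
    have := (Prod.ext_iff.mp hcontra).2
    simp at this
    exact ⟨this.1.symm, this.2.symm⟩
  have hfo := hfeq hp.2
  rw [hfo] at h3
  have : p1 ≠ (-1, -1) := by simpa using h3
  exact this (Prod.ext_iff.mpr ⟨hp.1, hp.2⟩)
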